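-- pv_equiv track=rewrite | github.com/abdulla2025/LeetCode_Top_Interview_150 | 58. [1536]. Minimum Swaps to Arrange a Binary Grid.py | minSwaps
-- ===== SOURCE A (Python) =====
-- from typing import List
--
-- def minSwaps(grid: List[List[int]]) -> int:
--     n = len(grid)
--     trailing = []
--     for row in grid:
--         count = 0
--         for j in range(n-1, -1, -1):
--             if row[j] == 0:
--                 count += 1
--             else:
--                 break
--         trailing.append(count)
--
--     swaps = 0
--     for i in range(n):
--         need = n - 1 - i
--         j = i
--         while j < n and trailing[j] < need:
--             j += 1
--         if j == n:
--             return -1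
--         while j > i:
--             trailing[j], trailing[j-1] = trailing[j-1], trailing[j]
--             j -= 1
--             swaps += 1
--     return swaps
-- ===== SOURCE B (Python) =====
-- from typing import List
--
-- def _place(rem: List[int], need: int, acc: int) -> int:
--     # recursively pick a row for each required trailing-zero count, largest need first;
--     # cost of a pick = its position in the shrinking list of remaining rows
--     if need < 0:
--         return acc
--     for k in range(len(rem)):
--         if rem[k] >= need:
--             return _place(rem[:k] + rem[k + 1:], need - 1, acc + k)
--     return -1
--
-- def minSwaps(grid: List[List[int]]) -> int:
--     n = len(grid)
--     rem = []
--     for row in grid: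
--         last = -1
--         for idx in range(n):
--             if row[idx] != 0:
--                 last = idx
--         rem.append(n - 1 - last)
--     return _place(rem, n - 1, 0)
-- ===== Notes on version B (the rewrite author's own statement) =====
-- stated objective: alternative
-- what changed: B computes each row's trailing-zero count from the last-nonzero index found by a forward scan, then solves the placement recursively on a shrinking list of remaining rows, charging each pick its position in that list and deleting it, instead of A's in-place adjacent-swap bubbling over a fixed-length list with j-i bookkeeping.
import Mathlib
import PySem

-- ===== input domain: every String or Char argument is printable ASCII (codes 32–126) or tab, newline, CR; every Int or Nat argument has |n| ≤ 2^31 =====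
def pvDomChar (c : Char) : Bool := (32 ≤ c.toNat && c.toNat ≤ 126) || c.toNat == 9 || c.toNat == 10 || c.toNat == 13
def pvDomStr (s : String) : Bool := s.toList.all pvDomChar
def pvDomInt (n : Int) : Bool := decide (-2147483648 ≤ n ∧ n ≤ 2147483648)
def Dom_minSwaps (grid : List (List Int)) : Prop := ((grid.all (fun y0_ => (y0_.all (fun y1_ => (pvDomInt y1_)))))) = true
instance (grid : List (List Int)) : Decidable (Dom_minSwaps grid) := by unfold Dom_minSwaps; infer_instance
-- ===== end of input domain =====

-- B derives trailing-zero counts from a forward last-nonzero scan and solves the placement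
-- recursively on a shrinking list of remaining rows (cost = position in that list, then delete),
-- instead of A's in-place adjacent-swap bubbling over a fixed-length list (objective: alternative).

-- ===== PORT A =====
-- trailing-zero count of the first m entries of row, scanning from index m-1 downward
def tcA (row : List Int) : Nat → Int
  | 0 => 0
  | m + 1 => if row.getD m 0 == 0 then tcA row m + 1 else 0

-- while j < n and trailing[j] < need: j += 1
def findJA (t : List Int) (n : Nat) (need : Int) (j : Nat) : Nat :=
  if j < n then
    if t.getD j 0 < need then findJA t n need (j + 1) else j
  else j
termination_by n - j

-- while j > i: swap trailing[j], trailing[j-1]; j -= 1; swaps += 1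
def bubbleA (i : Nat) : List Int → Int → Nat → List Int × Int
  | t, swaps, 0 => (t, swaps)
  | t, swaps, j + 1 =>
    if i < j + 1 then
      bubbleA i ((t.set j (t.getD (j + 1) 0)).set (j + 1) (t.getD j 0)) (swaps + 1) j
    else (t, swaps)

def loopA (n : Nat) (t : List Int) (swaps : Int) (i : Nat) : Int :=
  if i < n then
    let need : Int := (n : Int) - 1 - (i : Int)
    let j := findJA t n need i
    if j = n then -1
    else
      let p := bubbleA i t swaps j
      loopA n p.1 p.2 (i + 1)
  else swaps
termination_by n - i

def minSwaps (grid : List (List Int)) : Int :=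
  let n := grid.length
  loopA n (grid.map (fun row => tcA row n)) 0 0

-- ===== PORT B =====
-- last = -1; for idx in range(n): if row[idx] != 0: last = idx
def lastB (row : List Int) (n : Nat) : Int :=
  (List.range n).foldl (fun last idx => if row.getD idx 0 != 0 then (idx : Int) else last) (-1)

-- _place(rem, need, acc): recursion on need; first fitting element's position is its cost
def placeB (rem : List Int) (need : Int) (acc : Int) : Int :=
  if need < 0 then acc
  else
    match rem.findIdx? (fun v => need ≤ v) with
    | some k => placeB (rem.eraseIdx k) (need - 1) (acc + (k : Int))
    | none => -1
termination_by (need + 1).toNat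
decreasing_by omega

def minSwaps_alt (grid : List (List Int)) : Int :=
  let n := grid.length
  placeB (grid.map (fun row => (n : Int) - 1 - lastB row n)) ((n : Int) - 1) 0

-- ===== PRECONDITION & SPEC =====
-- Pre_ excludes grids with a row shorter than the number of rows: there A raises IndexError.
def Pre_minSwaps (grid : List (List Int)) : Prop :=
  ∀ row ∈ grid, grid.length ≤ row.length
instance (grid : List (List Int)) : Decidable (Pre_minSwaps grid) := by
  unfold Pre_minSwaps; infer_instance

def pvWitness_minSwaps : List (List Int) := [[0, 1], [1, 0]]

def Spec_minSwaps (grid : List (List Int)) (out : Int) : Prop := out = minSwaps_alt grid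
instance (grid : List (List Int)) (out : Int) : Decidable (Spec_minSwaps grid out) := by unfold Spec_minSwaps; infer_instance

-- ===== CLAIM (what is proved, stated in full; the proofs are below) =====
def Claim_equal_minSwaps : Prop := ∀ (grid : List (List Int)), Dom_minSwaps grid → Pre_minSwaps grid → Spec_minSwaps grid (minSwaps grid)

-- ===== LEMMAS AND PROOFS =====

-- trailing count = n - 1 - (last nonzero index among the first n, -1 if none)
theorem tc_eq_last (row : List Int) (n : Nat) : tcA row n = (n : Int) - 1 - lastB row n := by
  induction n with
  | zero => simp [tcA, lastB]
  | succ m ih =>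
    have hlast : lastB row (m + 1)
        = if row.getD m 0 != 0 then (m : Int) else lastB row m := by
      simp [lastB, List.range_succ]
    by_cases hz : row.getD m 0 = 0
    · have hA : tcA row (m + 1) = tcA row m + 1 := by
        simp only [tcA, hz, beq_self_eq_true, if_true]
      rw [hA, ih, hlast]
      simp only [hz, bne_self_eq_false, Bool.false_eq_true, if_false]
      push_cast; ring
    · have hA : tcA row (m + 1) = 0 := by
        simp only [tcA]; rw [if_neg (by simpa using hz)]
      have hb : (row.getD m 0 != 0) = true := by simpa using hz
      rw [hA, hlast, if_pos hb]
      push_cast; ring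

theorem findJA_eq (t : List Int) (n : Nat) (need : Int) (i : Nat)
    (hn : t.length = n) (hi : i ≤ n) :
    findJA t n need i =
      match (t.drop i).findIdx? (fun v => need ≤ v) with
      | some k => i + k
      | none => n := by
  rcases Nat.lt_or_ge i n with h | h
  · have hlt : i < t.length := by omega
    have hgd : t.getD i 0 = t[i] := by
      simp [List.getD, List.getElem?_eq_getElem hlt]
    rw [List.drop_eq_getElem_cons hlt, List.findIdx?_cons]
    by_cases hc : need ≤ t[i]
    · rw [findJA, if_pos h, hgd, if_neg (by omega : ¬ t[i] < need)]
      simp [hc]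
    · rw [findJA, if_pos h, hgd, if_pos (by omega : t[i] < need)]
      rw [findJA_eq t n need (i + 1) hn (by omega)]
      have hdec : (decide (need ≤ t[i])) = false := by simpa using hc
      rw [hdec, if_neg (by simp)]
      cases hfi : (t.drop (i + 1)).findIdx? (fun v => need ≤ v) with
      | none => simp
      | some k => simp only [Option.map_some]; ring
  · have hin : i = n := by omega
    subst hin
    rw [findJA, if_neg (by omega)]
    rw [List.drop_eq_nil_of_le (by omega), List.findIdx?_nil]
termination_by n - i

theorem swap_erase (t : List Int) (j : Nat) (h : j + 1 < t.length) :
    ((t.set j (t.getD (j + 1) 0)).set (j + 1) (t.getD j 0)).eraseIdx j = t.eraseIdx (j + 1) := by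
  induction j generalizing t with
  | zero =>
    match t, h with
    | a :: b :: rest, _ => simp [List.set, List.eraseIdx, List.getD]
  | succ m ih =>
    match t, h with
    | a :: rest, h =>
      have : m + 1 < rest.length := by simpa using h
      simp only [List.set_cons_succ, List.eraseIdx_cons_succ, List.getD_cons_succ]
      rw [ih rest this]

theorem swap_getD (t : List Int) (j : Nat) (h : j + 1 < t.length) :
    ((t.set j (t.getD (j + 1) 0)).set (j + 1) (t.getD j 0)).getD j 0 = t.getD (j + 1) 0 := by
  have hj : j < t.length := by omega
  simp [List.getD, hj, List.getElem?_eq_getElem h]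

theorem erase_insert_self (t : List Int) (i : Nat) (h : i < t.length) :
    (t.eraseIdx i).insertIdx i (t.getD i 0) = t := by
  induction i generalizing t with
  | zero =>
    match t, h with
    | a :: rest, _ => simp [List.eraseIdx, List.insertIdx, List.getD]
  | succ m ih =>
    match t, h with
    | a :: rest, h =>
      have : m < rest.length := by simpa using h
      simp only [List.eraseIdx_cons_succ, List.insertIdx_succ_cons, List.getD_cons_succ]
      rw [ih rest this]

theorem bubbleA_eq (i : Nat) (t : List Int) (s : Int) (j : Nat)
    (hij : i ≤ j) (hj : j < t.length) :
    bubbleA i t s j = ((t.eraseIdx j).insertIdx i (t.getD j 0), s + ((j : Int) - (i : Int))) := by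
  induction j generalizing t s with
  | zero =>
    have hi0 : i = 0 := by omega
    subst hi0
    rw [show bubbleA 0 t s 0 = (t, s) from rfl, erase_insert_self t 0 hj]
    norm_num
  | succ m ih =>
    by_cases h : i < m + 1
    · rw [bubbleA, if_pos h]
      have hlen : ((t.set m (t.getD (m + 1) 0)).set (m + 1) (t.getD m 0)).length = t.length := by
        simp
      rw [ih _ (s + 1) (by omega) (by omega)]
      rw [swap_erase t m hj, swap_getD t m hj]
      simp only [Prod.mk.injEq]
      refine ⟨trivial, by push_cast; ring⟩
    · have hi : i = m + 1 := by omega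
      subst hi
      rw [bubbleA, if_neg h, erase_insert_self t (m + 1) hj]
      norm_num

theorem drop_insertIdx_succ (l : List Int) (i : Nat) (x : Int) (h : i ≤ l.length) :
    (l.insertIdx i x).drop (i + 1) = l.drop i := by
  induction i generalizing l with
  | zero => simp [List.insertIdx]
  | succ m ih =>
    match l, h with
    | a :: rest, h =>
      have : m ≤ rest.length := by simpa using h
      simp only [List.insertIdx_succ_cons, List.drop_succ_cons]
      exact ih rest this

theorem drop_eraseIdx_add (l : List Int) (i k : Nat) :
    (l.eraseIdx (i + k)).drop i = (l.drop i).eraseIdx k := by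
  induction i generalizing l with
  | zero => simp
  | succ m ih =>
    match l with
    | [] => simp
    | a :: rest =>
      have : m + 1 + k = (m + k) + 1 := by omega
      rw [this]
      simp only [List.eraseIdx_cons_succ, List.drop_succ_cons]
      exact ih rest

-- A's outer loop at step i equals B's recursion on the remaining suffix
theorem loopA_eq_place (n : Nat) (t : List Int) (s : Int) (i : Nat)
    (hn : t.length = n) (hi : i ≤ n) :
    loopA n t s i = placeB (t.drop i) ((n : Int) - 1 - (i : Int)) s := by
  by_cases h : i < n
  · rw [loopA]
    simp only [h, if_true]
    rw [placeB, if_neg (by omega : ¬ (n : Int) - 1 - (i : Int) < 0)]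
    rw [findJA_eq t n _ i hn (by omega)]
    cases hfi : (t.drop i).findIdx? (fun v => ((n : Int) - 1 - (i : Int)) ≤ v) with
    | none => simp
    | some k =>
      have hk : k < (t.drop i).length := by
        have := (List.findIdx?_eq_some_iff_findIdx_eq.mp hfi).1
        omega
      have hjn : i + k < n := by
        rw [List.length_drop, hn] at hk; omega
      simp only []
      rw [if_neg (by omega : ¬ i + k = n)]
      rw [bubbleA_eq i t s (i + k) (by omega) (by omega)]
      have hlen : (((t.eraseIdx (i + k)).insertIdx i (t.getD (i + k) 0))).length = n := by
        have h1 : i + k < t.length := by omega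
        simp only [List.length_insertIdx, List.length_eraseIdx, if_pos h1]
        split_ifs <;> omega
      rw [loopA_eq_place n _ _ (i + 1) hlen (by omega)]
      have hdrop : (((t.eraseIdx (i + k)).insertIdx i (t.getD (i + k) 0))).drop (i + 1)
          = (t.drop i).eraseIdx k := by
        rw [drop_insertIdx_succ _ i _ (by rw [List.length_eraseIdx]; split_ifs <;> omega)]
        exact drop_eraseIdx_add t i k
      rw [hdrop]
      congr 1
      · push_cast; ring
      · push_cast; ring
  · have hin : i = n := by omega
    rw [loopA, if_neg (by omega)]
    rw [placeB, if_pos (by omega : (n : Int) - 1 - (i : Int) < 0)]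
termination_by n - i

-- ===== VERDICT (by name: the statement is the Claim_ definition above) =====
theorem minSwaps_spec : Claim_equal_minSwaps := by
  intro grid _ _
  unfold Spec_minSwaps minSwaps minSwaps_alt
  simp only []
  have hmap : grid.map (fun row => tcA row grid.length)
      = grid.map (fun row => (grid.length : Int) - 1 - lastB row grid.length) := by
    apply List.map_congr_left
    intro row _
    exact tc_eq_last row grid.length
  rw [hmap]
  rw [loopA_eq_place grid.length _ 0 0 (by simp) (by omega)]
  simp
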